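-- pv_equiv track=rewrite | github.com/xamad/aiChatbot | main/xiaozhi-server/plugins_func/functions/numeri_utili.py | leggi_numero
-- ===== SOURCE A (Python) =====
-- def leggi_numero(numero: str) -> str:
--     """Formatta numero per lettura vocale"""
--     # Gestisce numeri con trattini e lettere
--     result = ""
--     for c in numero:
--         if c.isdigit():
--             result += c + ". "
--         elif c == "-":
--             result += ", "
--         else:
--             result += c
--     return result.strip()
-- ===== SOURCE B (Python) =====
-- def leggi_numero(numero: str) -> str:
--     """Formatta numero per lettura vocale"""
--     # Staged whole-string substitutions instead of a per-character scan:
--     # the replacements are disjoint (", " and ". " contain no digit and no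
--     # hyphen), so one global replace per symbol gives the same result.
--     s = numero.replace("-", ", ")
--     for d in "0123456789":
--         s = s.replace(d, d + ". ")
--     return s.strip()
-- ===== Notes on version B (the rewrite author's own statement) =====
-- stated objective: faster
-- what changed: Replaces A's single per-character if/elif accumulation scan with eleven staged whole-string str.replace passes (one per symbol of the substitution alphabet: '-' and each digit), correct because the replacement strings are disjoint from the pattern alphabet; the per-character Python loop disappears into C-level library passes.
import Mathlib
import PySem

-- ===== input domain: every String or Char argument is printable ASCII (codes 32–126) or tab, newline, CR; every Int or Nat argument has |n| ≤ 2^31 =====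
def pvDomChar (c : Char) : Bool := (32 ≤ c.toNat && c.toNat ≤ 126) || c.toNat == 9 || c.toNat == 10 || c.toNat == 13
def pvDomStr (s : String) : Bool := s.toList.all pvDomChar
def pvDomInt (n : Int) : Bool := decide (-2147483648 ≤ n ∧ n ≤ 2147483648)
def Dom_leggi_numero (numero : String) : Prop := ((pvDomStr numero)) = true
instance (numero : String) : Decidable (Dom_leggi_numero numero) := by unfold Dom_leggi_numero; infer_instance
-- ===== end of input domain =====

-- B replaces A's per-character if/elif accumulation scan with eleven staged
-- whole-string replace passes (one per symbol '-','0'..'9'); same O(n) cost.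

-- ===== PORT A =====
-- the for-loop of A, accumulating `result` (strings as List Char, exact per PySem)
def leggiLoopA : List Char → List Char → List Char
  | result, [] => result
  | result, c :: rest =>
    if PySem.Chars.isdigit c then leggiLoopA (result ++ [c] ++ ['.', ' ']) rest
    else if c = '-' then leggiLoopA (result ++ [',', ' ']) rest
    else leggiLoopA (result ++ [c]) rest

def leggi_numero (numero : String) : String :=
  String.mk (PySem.Chars.strip (leggiLoopA [] numero.toList))

-- ===== PORT B =====
-- Source B: s = numero.replace('-', ', '); then one whole-string replace per digit; strip
def leggi_numero_alt (numero : String) : String :=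
  let s0 := PySem.Chars.replace numero.toList ['-'] [',', ' ']
  let s := ['0','1','2','3','4','5','6','7','8','9'].foldl
    (fun s d => PySem.Chars.replace s [d] [d, '.', ' ']) s0
  String.mk (PySem.Chars.strip s)

-- ===== PRECONDITION & SPEC =====
def Spec_leggi_numero (numero : String) (out : String) : Prop := out = leggi_numero_alt numero
instance (numero : String) (out : String) : Decidable (Spec_leggi_numero numero out) := by unfold Spec_leggi_numero; infer_instance

-- ===== CLAIM (what is proved, stated in full; the proofs are below) =====
def Claim_equal_leggi_numero : Prop := ∀ (numero : String), Dom_leggi_numero numero → Spec_leggi_numero numero (leggi_numero numero)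

-- ===== LEMMAS AND PROOFS =====

-- per-character substitution performed by a single-character replace
def substC (d : Char) (new : List Char) (c : Char) : List Char :=
  if c = d then new else [c]

-- the joint effect of all eleven stages on one character
def tblC (c : Char) : List Char :=
  if PySem.Chars.isdigit c then [c, '.', ' ']
  else if c = '-' then [',', ' ']
  else [c]

theorem replace_go_single (d : Char) (new : List Char) :
    ∀ (l : List Char) (fuel : Nat) (acc : List Char), l.length ≤ fuel →
      PySem.Chars.replace.go [d] new fuel l acc
        = acc.reverse ++ l.flatMap (substC d new) := by
  intro l
  induction l with
  | nil =>
    intro fuel acc _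
    cases fuel <;> simp [PySem.Chars.replace.go]
  | cons c t ih =>
    intro fuel acc h
    cases fuel with
    | zero => simp at h
    | succ n =>
      by_cases hc : c = d
      · subst hc
        simp only [PySem.Chars.replace.go, List.isPrefixOf, BEq.rfl, Bool.true_and,
          if_pos]
        simp only [List.length_cons, List.length_nil, List.drop_succ_cons, List.drop_zero]
        rw [ih n (new.reverse ++ acc) (by simpa using h)]
        simp [substC]
      · have : ([d].isPrefixOf (c :: t)) = false := by
          simp [List.isPrefixOf]
          exact fun h' => absurd h'.symm hc
        simp only [PySem.Chars.replace.go, this, Bool.false_eq_true, if_false]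
        rw [ih n (c :: acc) (by simpa using h)]
        simp [substC, hc]

theorem replace_single (cs : List Char) (d : Char) (new : List Char) :
    PySem.Chars.replace cs [d] new = cs.flatMap (substC d new) := by
  rw [PySem.Chars.replace]
  simp only [List.isEmpty_cons, Bool.false_eq_true, if_false]
  exact replace_go_single d new cs cs.length [] le_rfl

-- a flatMap-shaped foldl distributes over ++
theorem foldl_flatMap_append (L : List Char) (g : Char → Char → List Char)
    (x y : List Char) :
    L.foldl (fun s d => s.flatMap (g d)) (x ++ y)
      = L.foldl (fun s d => s.flatMap (g d)) x
        ++ L.foldl (fun s d => s.flatMap (g d)) y := by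
  induction L generalizing x y with
  | nil => simp
  | cons d L ih => simp [List.foldl_cons, List.flatMap_append, ih]

-- the eleven stages act on one character exactly as tblC
theorem stages_single (c : Char) :
    ['0','1','2','3','4','5','6','7','8','9'].foldl
        (fun s d => s.flatMap (substC d [d, '.', ' '])) (substC '-' [',', ' '] c)
      = tblC c := by
  by_cases h0 : c = '0'; · subst h0; decide
  by_cases h1 : c = '1'; · subst h1; decide
  by_cases h2 : c = '2'; · subst h2; decide
  by_cases h3 : c = '3'; · subst h3; decide
  by_cases h4 : c = '4'; · subst h4; decide
  by_cases h5 : c = '5'; · subst h5; decide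
  by_cases h6 : c = '6'; · subst h6; decide
  by_cases h7 : c = '7'; · subst h7; decide
  by_cases h8 : c = '8'; · subst h8; decide
  by_cases h9 : c = '9'; · subst h9; decide
  have hd : PySem.Chars.isdigit c = false := by
    simp only [PySem.Chars.isdigit]
    by_contra hcon
    simp only [Bool.not_eq_false, Bool.and_eq_true, decide_eq_true_eq] at hcon
    obtain ⟨hlo, hhi⟩ := hcon
    have hlo' : 48 ≤ c.toNat := hlo
    have hhi' : c.toNat ≤ 57 := hhi
    have hofn : c = Char.ofNat c.toNat := (Char.ofNat_toNat c).symm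
    interval_cases h : c.toNat <;> subst hofn <;>
      first
        | exact h0 rfl | exact h1 rfl | exact h2 rfl | exact h3 rfl | exact h4 rfl
        | exact h5 rfl | exact h6 rfl | exact h7 rfl | exact h8 rfl | exact h9 rfl
  by_cases hm : c = '-'
  · subst hm; decide
  · simp [substC, tblC, hm, hd, h0, h1, h2, h3, h4, h5, h6, h7, h8, h9, List.foldl]

-- the whole staged pipeline equals one flatMap of tblC
theorem stages_eq (cs : List Char) :
    ['0','1','2','3','4','5','6','7','8','9'].foldl
        (fun s d => PySem.Chars.replace s [d] [d, '.', ' '])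
        (PySem.Chars.replace cs ['-'] [',', ' '])
      = cs.flatMap tblC := by
  simp only [replace_single]
  induction cs with
  | nil => simp
  | cons c t ih =>
    have hsplit : (c :: t).flatMap (substC '-' [',', ' '])
        = (substC '-' [',', ' '] c) ++ t.flatMap (substC '-' [',', ' ']) := by simp
    rw [hsplit, foldl_flatMap_append, ih, stages_single, List.flatMap_cons]

-- A's loop is the same flatMap
theorem leggiLoopA_eq (cs acc : List Char) :
    leggiLoopA acc cs = acc ++ cs.flatMap tblC := by
  induction cs generalizing acc with
  | nil => simp [leggiLoopA]
  | cons c rest ih =>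
    simp only [leggiLoopA, List.flatMap_cons, tblC]
    split_ifs <;> simp_all

-- ===== VERDICT (by name: the statement is the Claim_ definition above) =====
theorem leggi_numero_spec : Claim_equal_leggi_numero := by
  intro numero _
  unfold Spec_leggi_numero leggi_numero leggi_numero_alt
  simp only [leggiLoopA_eq, List.nil_append, stages_eq]
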